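-- pv_equiv track=rewrite | github.com/masc-ucsc/hagent | hagent/inou/tests/cli_executor_patches_xiangshan.py | cluster_line_numbers
-- ===== SOURCE A (Python) =====
-- def cluster_line_numbers(line_nums, max_gap=5):
--     """Cluster line numbers that are close together."""
--     if not line_nums:
--         return []
--     nums = sorted(set(line_nums))
--     clusters = []
--     start = prev = nums[0]
--     for n in nums[1:]:
--         if n - prev <= max_gap:
--             prev = n
--         else:
--             clusters.append((start, prev))
--             start = prev = n
--     clusters.append((start, prev))
--     return clusters
-- ===== SOURCE B (Python) =====
-- def cluster_line_numbers(line_nums, max_gap=5):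
--     """Cluster line numbers that are close together."""
--     if not line_nums:
--         return []
--     nums = sorted(set(line_nums))
--     pairs = list(zip(nums, nums[1:]))
--     starts = [nums[0]] + [b for a, b in pairs if b - a > max_gap]
--     ends = [a for a, b in pairs if b - a > max_gap] + [nums[-1]]
--     return list(zip(starts, ends))
-- ===== Notes on version B (the rewrite author's own statement) =====
-- stated objective: alternative
-- what changed: Instead of one incremental loop carrying (clusters, start, prev), B builds the consecutive-pairs list once, derives the cluster start and end lists separately by filtering the large-gap pairs, and zips them together.
import Mathlib
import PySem

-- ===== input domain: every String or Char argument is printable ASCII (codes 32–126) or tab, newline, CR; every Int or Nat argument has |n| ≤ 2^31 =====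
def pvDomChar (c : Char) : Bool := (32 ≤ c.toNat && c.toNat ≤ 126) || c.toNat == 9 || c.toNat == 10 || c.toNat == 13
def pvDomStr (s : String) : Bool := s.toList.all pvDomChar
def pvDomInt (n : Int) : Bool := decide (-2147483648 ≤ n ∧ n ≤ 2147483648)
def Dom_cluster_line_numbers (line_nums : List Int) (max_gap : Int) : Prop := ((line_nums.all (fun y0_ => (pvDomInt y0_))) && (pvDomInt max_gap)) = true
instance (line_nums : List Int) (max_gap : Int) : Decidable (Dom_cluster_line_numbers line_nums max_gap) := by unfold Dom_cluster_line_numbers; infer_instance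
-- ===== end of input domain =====

-- B replaces A's incremental (clusters, start, prev) loop with a pairs-filter-and-zip decomposition; alternative structure, same cost.

-- ===== PORT A =====
-- the 'for n in nums[1:]' loop, state (clusters, start, prev)
def clusterLoop (g : Int) : List Int → List (Int × Int) → Int → Int → List (Int × Int)
  | [], clusters, start, prev => clusters ++ [(start, prev)]
  | n :: rest, clusters, start, prev =>
      if n - prev ≤ g then clusterLoop g rest clusters start n
      else clusterLoop g rest (clusters ++ [(start, prev)]) n n

def cluster_line_numbers (line_nums : List Int) (max_gap : Int) : List (Int × Int) :=
  if line_nums = [] then []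
  else
    -- nums = sorted(set(line_nums)); nums[0]; loop over nums[1:] (= tail)
    let nums := PySem.List.sorted (PySem.Set.ofList line_nums) (fun x => x) false
    clusterLoop max_gap nums.tail [] (PySem.List.pyGetD nums 0 0) (PySem.List.pyGetD nums 0 0)

-- ===== PORT B =====
def cluster_line_numbers_alt (line_nums : List Int) (max_gap : Int) : List (Int × Int) :=
  if line_nums = [] then []
  else
    let nums := PySem.List.sorted (PySem.Set.ofList line_nums) (fun x => x) false
    -- pairs = list(zip(nums, nums[1:]))
    let pairs := List.zip nums nums.tail
    -- starts = [nums[0]] + [b for a, b in pairs if b - a > max_gap]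
    let starts := PySem.List.pyGetD nums 0 0 ::
      (pairs.filter (fun p => decide (p.2 - p.1 > max_gap))).map Prod.snd
    -- ends = [a for a, b in pairs if b - a > max_gap] + [nums[-1]]
    let ends := (pairs.filter (fun p => decide (p.2 - p.1 > max_gap))).map Prod.fst ++
      [PySem.List.pyGetD nums (-1) 0]
    List.zip starts ends

-- ===== PRECONDITION & SPEC =====
def Spec_cluster_line_numbers (line_nums : List Int) (max_gap : Int) (out : List (Int × Int)) : Prop := out = cluster_line_numbers_alt line_nums max_gap
instance (line_nums : List Int) (max_gap : Int) (out : List (Int × Int)) : Decidable (Spec_cluster_line_numbers line_nums max_gap out) := by unfold Spec_cluster_line_numbers; infer_instance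

-- ===== CLAIM (what is proved, stated in full; the proofs are below) =====
def Claim_equal_cluster_line_numbers : Prop := ∀ (line_nums : List Int) (max_gap : Int), Dom_cluster_line_numbers line_nums max_gap → Spec_cluster_line_numbers line_nums max_gap (cluster_line_numbers line_nums max_gap)

-- ===== LEMMAS AND PROOFS =====

-- A's loop equals B's filter/zip decomposition, for any prefix state.
lemma clusterLoop_eq (g : Int) (rest : List Int) :
    ∀ (clusters : List (Int × Int)) (start prev : Int),
    clusterLoop g rest clusters start prev =
      clusters ++ List.zip
        (start :: ((List.zip (prev :: rest) rest).filter (fun p => decide (p.2 - p.1 > g))).map Prod.snd)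
        (((List.zip (prev :: rest) rest).filter (fun p => decide (p.2 - p.1 > g))).map Prod.fst ++
          [PySem.List.pyGetD (prev :: rest) (-1) 0]) := by
  induction rest with
  | nil =>
      intro clusters start prev
      simp [clusterLoop, PySem.List.pyGetD_neg_one]
  | cons n rest' ih =>
      intro clusters start prev
      by_cases h : n - prev ≤ g
      · have hkeep : ¬ (n - prev > g) := by omega
        simp only [clusterLoop, if_pos h, List.zip_cons_cons, List.filter_cons,
          decide_eq_true_eq, hkeep, ite_false]
        rw [ih clusters start n]
        have : PySem.List.pyGetD (prev :: n :: rest') (-1) 0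
             = PySem.List.pyGetD (n :: rest') (-1) 0 := by simp [pysem]
        rw [this]
      · have hgt : n - prev > g := by omega
        simp only [clusterLoop, if_neg h, List.zip_cons_cons, List.filter_cons,
          decide_eq_true_eq, hgt, ite_true, List.map_cons]
        rw [ih (clusters ++ [(start, prev)]) n n]
        have : PySem.List.pyGetD (prev :: n :: rest') (-1) 0
             = PySem.List.pyGetD (n :: rest') (-1) 0 := by simp [pysem]
        rw [this]
        simp [List.zip_cons_cons, List.append_assoc]

-- ===== VERDICT (by name: the statement is the Claim_ definition above) =====
theorem cluster_line_numbers_spec : Claim_equal_cluster_line_numbers := by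
  intro line_nums max_gap _
  unfold Spec_cluster_line_numbers cluster_line_numbers cluster_line_numbers_alt
  by_cases hnil : line_nums = []
  · simp [hnil]
  · simp only [if_neg hnil]
    set nums := PySem.List.sorted (PySem.Set.ofList line_nums) (fun x => x) false with hnums
    have hne : nums ≠ [] := by
      rw [hnums, Ne, PySem.List.sorted_eq_nil_iff]
      intro hempty
      rcases List.exists_mem_of_ne_nil line_nums hnil with ⟨x, hx⟩
      have : x ∈ PySem.Set.ofList line_nums := (PySem.Set.mem_ofList _ _).mpr hx
      simp [hempty] at this
    obtain ⟨n0, rest, hcons⟩ := List.exists_cons_of_ne_nil hne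
    rw [hcons]
    simpa [PySem.List.pyGetD_zero_cons] using
      clusterLoop_eq max_gap rest [] n0 n0
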